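-- pv_equiv track=rewrite | github.com/tashiscool/ciso-assistant-community | backend/core/bounded_contexts/rmf_operations/services/ksi_import.py | _applies_to_impact_level
-- ===== SOURCE A (Python) =====
-- from typing import Dict, List, Any, Optional
--
-- def _applies_to_impact_level(ksi_levels: List[str], target: str) -> bool:
--     """
--     Check if KSI applies to the target impact level.
--
--     Higher impact levels include all KSIs from lower levels.
--
--     Args:
--         ksi_levels: List of impact levels the KSI applies to
--         target: Target impact level (low, moderate, high)
--
--     Returns:
--         True if KSI applies to the target level
--     """
--     target_lower = target.lower()
--
--     # Map target impact level to applicable KSI levels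
--     level_map = {
--         'low': ['LOW', 'low'],
--         'moderate': ['MOD', 'moderate', 'LOW', 'low'],
--         'high': ['HIGH', 'high', 'MOD', 'moderate', 'LOW', 'low'],
--     }
--
--     applicable = level_map.get(target_lower, [])
--     return any(level in applicable for level in ksi_levels)
-- ===== SOURCE B (Python) =====
-- _TOKENS = {'low': ('LOW', 'low'), 'moderate': ('MOD', 'moderate'), 'high': ('HIGH', 'high')}
-- _LOWER = {'high': 'moderate', 'moderate': 'low'}
--
-- def _applies_to_impact_level(ksi_levels, target):
--     """Walk down the hierarchy from the target level: at each level, search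
--     ksi_levels for that level's own tokens, then descend to the next lower level."""
--     return _check_down(ksi_levels, target.lower())
--
-- def _check_down(ksi_levels, level):
--     toks = _TOKENS.get(level)
--     if toks is None:
--         return False
--     if any(tok in ksi_levels for tok in toks):
--         return True
--     return _check_down(ksi_levels, _LOWER.get(level, ''))
-- ===== Notes on version B (the rewrite author's own statement) =====
-- stated objective: alternative
-- what changed: Inverts the traversal: instead of one pass over ksi_levels testing membership in a precomputed per-target token list, B recursively descends the level hierarchy (high->moderate->low) and at each stage searches ksi_levels for that stage's own two tokens.
import Mathlib
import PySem

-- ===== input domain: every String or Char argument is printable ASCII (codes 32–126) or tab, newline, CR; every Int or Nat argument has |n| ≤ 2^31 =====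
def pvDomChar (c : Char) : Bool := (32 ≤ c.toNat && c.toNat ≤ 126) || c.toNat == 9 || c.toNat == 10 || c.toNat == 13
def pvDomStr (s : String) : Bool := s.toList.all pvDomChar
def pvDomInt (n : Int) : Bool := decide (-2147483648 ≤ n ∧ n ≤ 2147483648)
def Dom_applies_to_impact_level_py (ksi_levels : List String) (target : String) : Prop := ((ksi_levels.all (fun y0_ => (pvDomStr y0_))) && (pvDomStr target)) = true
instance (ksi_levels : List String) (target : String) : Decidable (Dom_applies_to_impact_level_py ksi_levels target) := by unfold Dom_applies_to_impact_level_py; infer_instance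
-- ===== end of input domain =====

-- B inverts the traversal: it descends the level hierarchy recursively and searches
-- ksi_levels for each stage's own tokens, instead of A's single pass over ksi_levels
-- against a precomputed per-target token list (alternative; same cost).

-- ===== PORT A =====
def applies_to_impact_level_py (ksi_levels : List String) (target : String) : Bool :=
  let target_lower := PySem.Str.lower target
  let level_map : PySem.Dict String (List String) :=
    ((PySem.Dict.empty.insert "low" ["LOW", "low"]).insert "moderate"
        ["MOD", "moderate", "LOW", "low"]).insert "high"
      ["HIGH", "high", "MOD", "moderate", "LOW", "low"]
  let applicable := level_map.getD target_lower []
  ksi_levels.any (fun level => applicable.contains level)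

-- ===== PORT B =====
-- _TOKENS of Source B
def pvTokens : PySem.Dict String (List String) :=
  ((PySem.Dict.empty.insert "low" ["LOW", "low"]).insert "moderate"
      ["MOD", "moderate"]).insert "high" ["HIGH", "high"]

-- _LOWER of Source B
def pvLower : PySem.Dict String String :=
  (PySem.Dict.empty.insert "high" "moderate").insert "moderate" "low"

-- _check_down of Source B; a fuel argument (4 suffices: the descent chain is at most
-- high → moderate → low → miss) makes the recursion total, nothing else changes.
def pvCheckDown (fuel : Nat) (ksi_levels : List String) (level : String) : Bool :=
  match fuel with
  | 0 => false
  | fuel + 1 =>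
    match pvTokens.get? level with
    | none => false
    | some toks =>
      if toks.any (fun tok => ksi_levels.contains tok) then true
      else pvCheckDown fuel ksi_levels (pvLower.getD level "")

def applies_to_impact_level_py_alt (ksi_levels : List String) (target : String) : Bool :=
  pvCheckDown 4 ksi_levels (PySem.Str.lower target)

-- ===== PRECONDITION & SPEC =====
def Spec_applies_to_impact_level_py (ksi_levels : List String) (target : String) (out : Bool) : Prop := out = applies_to_impact_level_py_alt ksi_levels target
instance (ksi_levels : List String) (target : String) (out : Bool) : Decidable (Spec_applies_to_impact_level_py ksi_levels target out) := by unfold Spec_applies_to_impact_level_py; infer_instance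

-- ===== CLAIM (what is proved, stated in full; the proofs are below) =====
def Claim_equal_applies_to_impact_level_py : Prop := ∀ (ksi_levels : List String) (target : String), Dom_applies_to_impact_level_py ksi_levels target → Spec_applies_to_impact_level_py ksi_levels target (applies_to_impact_level_py ksi_levels target)

-- ===== LEMMAS AND PROOFS =====

-- one pass over xs against a token list equals a search of xs for each token
theorem pv_any_contains_comm (xs toks : List String) :
    xs.any (fun l => toks.contains l) = toks.any (fun t => xs.contains t) := by
  apply Bool.eq_iff_iff.mpr
  simp [List.any_eq_true]
  tauto

theorem pv_case_low (xs : List String) :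
    xs.any (fun l => (["LOW", "low"] : List String).contains l) =
      pvCheckDown 4 xs "low" := by
  rw [pv_any_contains_comm]
  simp [pvCheckDown, pvTokens, pvLower, PySem.Dict.empty, PySem.Dict.insert,
    PySem.Dict.get?, PySem.Dict.getD]

theorem pv_case_mod (xs : List String) :
    xs.any (fun l => (["MOD", "moderate", "LOW", "low"] : List String).contains l) =
      pvCheckDown 4 xs "moderate" := by
  rw [pv_any_contains_comm]
  simp [pvCheckDown, pvTokens, pvLower, PySem.Dict.empty, PySem.Dict.insert,
    PySem.Dict.get?, PySem.Dict.getD, Bool.or_assoc]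

theorem pv_case_high (xs : List String) :
    xs.any (fun l => (["HIGH", "high", "MOD", "moderate", "LOW", "low"] : List String).contains l) =
      pvCheckDown 4 xs "high" := by
  rw [pv_any_contains_comm]
  simp [pvCheckDown, pvTokens, pvLower, PySem.Dict.empty, PySem.Dict.insert,
    PySem.Dict.get?, PySem.Dict.getD, Bool.or_assoc]

-- ===== VERDICT (by name: the statement is the Claim_ definition above) =====
theorem applies_to_impact_level_py_spec : Claim_equal_applies_to_impact_level_py := by
  intro ksi_levels target _
  unfold Spec_applies_to_impact_level_py applies_to_impact_level_py applies_to_impact_level_py_alt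
  by_cases h1 : PySem.Str.lower target = "low"
  · rw [h1]; exact pv_case_low ksi_levels
  by_cases h2 : PySem.Str.lower target = "moderate"
  · rw [h2]; exact pv_case_mod ksi_levels
  by_cases h3 : PySem.Str.lower target = "high"
  · rw [h3]; exact pv_case_high ksi_levels
  have h1' : ¬("low" = PySem.Str.lower target) := fun e => h1 e.symm
  have h2' : ¬("moderate" = PySem.Str.lower target) := fun e => h2 e.symm
  have h3' : ¬("high" = PySem.Str.lower target) := fun e => h3 e.symm
  simp [pvCheckDown, pvTokens, PySem.Dict.empty, PySem.Dict.insert,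
    PySem.Dict.get?, PySem.Dict.getD, h1', h2', h3']
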